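-- pv_equiv track=rewrite | github.com/moeller5002/MastermindProgram | mastermindCodeManager.py | genCodeAndColorList
-- ===== SOURCE A (Python) =====
-- import itertools
--
-- def genCodeAndColorList(codeLength, numColors):
--     #Temporary, need better system
--     if (numColors^codeLength > 300000):
--         return ValueError('OVERLOADED: Too big of list ')
--
--     #full_color_list = ['a', 'b', 'c', 'd', 'e', 'f', 'g', 'h', 'i', 'j', 'k']
--     full_color_list = ['a', 'b', 'c', 'd', 'e', 'f', 'g', 'h', 'i', 'j', 'k']
--
--     color_list = full_color_list[0:(numColors)]
--     permutations = itertools.product(color_list, repeat = codeLength)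
--     allCodes = list(permutations)
--
--     allCodesStr = []
--     for i in allCodes:
--         X = ''.join(i)
--         allCodesStr.append(X)
--
--     return allCodesStr, color_list
-- ===== SOURCE B (Python) =====
-- def genCodeAndColorList(codeLength, numColors):
--     # same guard as the original (XOR kept verbatim)
--     if (numColors ^ codeLength) > 300000:
--         return ValueError('OVERLOADED: Too big of list ')
--
--     color_list = ['a', 'b', 'c', 'd', 'e', 'f', 'g', 'h', 'i', 'j', 'k'][:numColors]
--     c = len(color_list)
--
--     # ranking/unranking: the i-th code (lexicographic) is i written in base c,
--     # MSB first, digits mapped to colors; no Cartesian product is materialised.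
--     allCodesStr = []
--     for i in range(c ** codeLength):
--         s = ''
--         x = i
--         for _ in range(codeLength):
--             s = color_list[x % c] + s
--             x //= c
--         allCodesStr.append(s)
--
--     return allCodesStr, color_list
-- ===== Notes on version B (the rewrite author's own statement) =====
-- stated objective: alternative
-- what changed: Replaces the materialised itertools.product enumeration with unranking: the i-th code is computed directly from the index i by repeated divmod in base len(color_list), string built MSB-first, so no tuple product is ever built.
import Mathlib
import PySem

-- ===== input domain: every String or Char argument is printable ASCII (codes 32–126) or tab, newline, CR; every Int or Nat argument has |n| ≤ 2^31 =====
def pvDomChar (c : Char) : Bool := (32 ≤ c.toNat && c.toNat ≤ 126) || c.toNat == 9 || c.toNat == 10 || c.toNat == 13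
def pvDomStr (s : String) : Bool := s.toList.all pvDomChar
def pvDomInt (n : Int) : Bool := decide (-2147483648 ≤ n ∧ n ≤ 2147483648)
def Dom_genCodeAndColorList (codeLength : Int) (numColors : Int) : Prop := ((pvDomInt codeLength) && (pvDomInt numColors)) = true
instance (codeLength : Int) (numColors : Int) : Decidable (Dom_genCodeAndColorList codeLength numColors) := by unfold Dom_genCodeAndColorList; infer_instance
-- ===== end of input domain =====

-- B unranks each code directly from its index (base-c digits, MSB first) instead of A's
-- materialised itertools.product enumeration; equality of the returned value is proved on Pre_.

-- ===== PORT A =====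
-- itertools.product(color_list, repeat=n): leftmost coordinate varies slowest
def pvProdA (pool : List String) : Nat → List (List String)
  | 0 => [[]]
  | n + 1 => pool.flatMap (fun c => (pvProdA pool n).map (fun t => c :: t))

def genCodeAndColorList (codeLength : Int) (numColors : Int) : List String × List String :=
  if PySem.Int.bxor numColors codeLength > 300000 then
    ([], [])  -- Python returns a ValueError OBJECT here (not a list pair); outside Pre_
  else
    let full_color_list := ["a", "b", "c", "d", "e", "f", "g", "h", "i", "j", "k"]
    let color_list := PySem.List.slice full_color_list (some 0) (some numColors)
    -- repeat=codeLength: Python raises ValueError for codeLength < 0 (outside Pre_), so .toNat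
    let allCodes := pvProdA color_list codeLength.toNat
    let allCodesStr := allCodes.foldl (fun acc i => acc ++ [PySem.Str.join "" i]) []
    (allCodesStr, color_list)

-- ===== PORT B =====
def genCodeAndColorList_alt (codeLength : Int) (numColors : Int) : List String × List String :=
  if PySem.Int.bxor numColors codeLength > 300000 then
    ([], [])  -- same guard, same ValueError object in Python; outside Pre_
  else
    let color_list := PySem.List.slice ["a", "b", "c", "d", "e", "f", "g", "h", "i", "j", "k"] (some 0) (some numColors)
    let c : Int := (color_list.length : Int)
    -- range(c ** codeLength): codeLength ≥ 0 inside Pre_, so c ** codeLength = c ^ codeLength.toNat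
    let allCodesStr := (PySem.List.pyRange 0 (c ^ codeLength.toNat) 1).map (fun i =>
      -- s = ''; x = i; for _ in range(codeLength): s = color_list[x % c] + s; x //= c
      -- color_list[x % c] is always in range when the loop runs (0 ≤ x % c < c), so pyGetD is exact
      ((List.range codeLength.toNat).foldl
        (fun (st : String × Int) _ =>
          (PySem.List.pyGetD color_list (PySem.Int.mod st.2 c) "" ++ st.1, PySem.Int.floordiv st.2 c))
        ("", i)).1)
    (allCodesStr, color_list)

-- ===== PRECONDITION & SPEC =====
-- Pre_ excludes (i) inputs where the XOR guard fires: there A RETURNS a ValueError object,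
-- not a pair of lists, and (ii) codeLength < 0, where itertools.product raises ValueError.
def Pre_genCodeAndColorList (codeLength : Int) (numColors : Int) : Prop :=
  0 ≤ codeLength ∧ PySem.Int.bxor numColors codeLength ≤ 300000
instance (codeLength : Int) (numColors : Int) : Decidable (Pre_genCodeAndColorList codeLength numColors) := by unfold Pre_genCodeAndColorList; infer_instance

def pvWitness_genCodeAndColorList : Int × Int := (2, 2)

def Spec_genCodeAndColorList (codeLength : Int) (numColors : Int) (out : List String × List String) : Prop := out = genCodeAndColorList_alt codeLength numColors
instance (codeLength : Int) (numColors : Int) (out : List String × List String) : Decidable (Spec_genCodeAndColorList codeLength numColors out) := by unfold Spec_genCodeAndColorList; infer_instance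

-- ===== CLAIM (what is proved, stated in full; the proofs are below) =====
def Claim_equal_genCodeAndColorList : Prop := ∀ (codeLength : Int) (numColors : Int), Dom_genCodeAndColorList codeLength numColors → Pre_genCodeAndColorList codeLength numColors → Spec_genCodeAndColorList codeLength numColors (genCodeAndColorList codeLength numColors)

-- ===== LEMMAS AND PROOFS =====

-- append a color on the right / prepend a color on the left, over a list of partial codes
def pvStepR (cl : List String) (acc : List String) : List String :=
  acc.flatMap (fun p => cl.map (fun c => p ++ c))
def pvStepL (cl : List String) (acc : List String) : List String :=
  cl.flatMap (fun c => acc.map (fun p => c ++ p))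

theorem pv_inter_nil {α : Type} (l : List (List α)) : List.intercalate [] l = l.flatten := by
  induction l with
  | nil => simp [List.intercalate]
  | cons x xs ih =>
    cases xs with
    | nil => simp [List.intercalate]
    | cons y ys =>
      simp [List.intercalate, List.intersperse] at ih ⊢
      simpa using ih

theorem pv_join_empty_cons (s : String) (l : List String) :
    PySem.Str.join "" (s :: l) = s ++ PySem.Str.join "" l := by
  simp [PySem.Str.join, PySem.Chars.join, pv_inter_nil]

theorem pv_join_empty_nil : PySem.Str.join "" ([] : List String) = "" := by decide

-- A's map-join satisfies the left-prepend recurrence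
theorem pv_mapjoin_succ (cl : List String) (n : Nat) :
    (pvProdA cl (n + 1)).map (PySem.Str.join "") =
      pvStepL cl ((pvProdA cl n).map (PySem.Str.join "")) := by
  simp [pvProdA, pvStepL, List.map_flatMap, Function.comp_def, pv_join_empty_cons]

-- the two step functions commute
theorem pv_step_comm (cl acc : List String) :
    pvStepR cl (pvStepL cl acc) = pvStepL cl (pvStepR cl acc) := by
  simp [pvStepR, pvStepL, List.flatMap_map, List.map_flatMap, List.flatMap_assoc,
    Function.comp_def, String.append_assoc]

-- on the iterates of pvStepR starting from [""], the two steps agree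
theorem pv_step_agree (cl : List String) (n : Nat) :
    pvStepL cl ((pvStepR cl)^[n] [""]) = pvStepR cl ((pvStepR cl)^[n] [""]) := by
  induction n with
  | zero => simp [pvStepL, pvStepR, List.flatMap_singleton']
  | succ n ih =>
    rw [Function.iterate_succ_apply', ← pv_step_comm, ih]

-- A's joined product list equals the n-fold right-append rebuild
theorem pv_mapjoin_eq_iter (cl : List String) (n : Nat) :
    (pvProdA cl n).map (PySem.Str.join "") = (pvStepR cl)^[n] [""] := by
  induction n with
  | zero => simp [pvProdA, pv_join_empty_nil]
  | succ n ih =>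
    rw [pv_mapjoin_succ, ih, Function.iterate_succ_apply', pv_step_agree]

-- B's foldl over range with a constant function is function iteration
theorem pv_foldl_range_iter {α : Type} (f : α → α) (n : Nat) (s : α) :
    (List.range n).foldl (fun a _ => f a) s = f^[n] s := by
  induction n generalizing s with
  | zero => simp
  | succ n ih =>
    rw [List.range_succ, List.foldl_append, ih, Function.iterate_succ_apply']
    simp

-- the base-c digit string of i (MSB first), n digits
def pvS (cl : List String) : Nat → Nat → String
  | 0, _ => ""
  | n + 1, i => pvS cl n (i / cl.length) ++ cl.getD (i % cl.length) ""

-- B's inner divmod loop computes pvS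
theorem pv_iter_char (cl : List String) (n : Nat) : ∀ (s : String) (i : Nat),
    (fun (st : String × Int) =>
        (PySem.List.pyGetD cl (PySem.Int.mod st.2 (cl.length : Int)) "" ++ st.1,
         PySem.Int.floordiv st.2 (cl.length : Int)))^[n] (s, (i : Int))
      = (pvS cl n i ++ s, ((i / cl.length ^ n : Nat) : Int)) := by
  induction n with
  | zero => intro s i; simp [pvS]
  | succ n ih =>
    intro s i
    rw [Function.iterate_succ_apply]
    simp only [PySem.Int.mod_natCast, PySem.Int.floordiv_natCast, PySem.List.pyGetD_natCast]
    rw [ih]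
    refine Prod.ext ?_ ?_
    · simp [pvS, String.append_assoc]
    · rw [Nat.div_div_eq_div_mul, ← pow_succ']

-- range(c*t) split into t blocks of c
theorem pv_range_mul {α : Type} (c : Nat) (g : Nat → α) : ∀ (t : Nat),
    (List.range (c * t)).map g
      = (List.range t).flatMap (fun j => (List.range c).map (fun m => g (c * j + m))) := by
  intro t
  induction t with
  | zero => simp
  | succ t ih =>
    rw [Nat.mul_succ, List.range_add, List.map_append, ih, List.range_succ,
      List.flatMap_append]
    simp [Function.comp_def]

-- reading off a list by index
theorem pv_getD_range {α : Type} [Inhabited α] (l : List α) (d : α) :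
    (List.range l.length).map (fun m => l.getD m d) = l := by
  apply List.ext_getElem
  · simp
  · intro i h1 h2
    simp [List.getD_eq_getElem?_getD, List.getElem?_eq_getElem h2]

-- the indexed list of digit strings satisfies the same right-append recursion
theorem pv_allB_succ (cl : List String) (n : Nat) :
    (List.range (cl.length ^ (n + 1))).map (pvS cl (n + 1))
      = pvStepR cl ((List.range (cl.length ^ n)).map (pvS cl n)) := by
  rw [pow_succ, Nat.mul_comm, pv_range_mul, pvStepR, List.flatMap_map]
  rw [List.flatMap, List.flatMap]
  congr 1
  apply List.map_congr_left
  intro j _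
  have h1 : (List.range cl.length).map (fun m => pvS cl (n + 1) (cl.length * j + m))
      = (List.range cl.length).map (fun m => pvS cl n j ++ cl.getD m "") := by
    apply List.map_congr_left
    intro m hm
    rw [List.mem_range] at hm
    have hc : 0 < cl.length := Nat.pos_of_ne_zero (by omega)
    rw [pvS, Nat.mul_add_div hc, Nat.div_eq_of_lt hm, Nat.add_zero,
      Nat.mul_add_mod, Nat.mod_eq_of_lt hm]
  rw [h1]
  generalize pvS cl n j = p
  conv_rhs => rw [← pv_getD_range cl ""]
  simp [List.map_map, Function.comp_def]

theorem pv_allB_eq_iter (cl : List String) (n : Nat) :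
    (List.range (cl.length ^ n)).map (pvS cl n) = (pvStepR cl)^[n] [""] := by
  induction n with
  | zero => simp [List.range_one, pvS]
  | succ n ih =>
    rw [pv_allB_succ, ih, Function.iterate_succ_apply']

-- ===== VERDICT (by name: the statement is the Claim_ definition above) =====
theorem genCodeAndColorList_spec : Claim_equal_genCodeAndColorList := by
  intro codeLength numColors _ _
  unfold Spec_genCodeAndColorList genCodeAndColorList genCodeAndColorList_alt
  split
  · rfl
  · refine Prod.ext ?_ rfl
    simp only []
    rw [PySem.List.foldl_append_singleton_eq_map, pv_mapjoin_eq_iter]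
    rw [← Nat.cast_pow, PySem.List.pyRange_zero_natCast, List.map_map, List.nil_append,
      ← pv_allB_eq_iter]
    apply Eq.symm
    apply List.map_congr_left
    intro j _
    show (List.foldl _ ("", (Int.ofNat j)) (List.range codeLength.toNat)).1 = _
    rw [pv_foldl_range_iter
      (fun (st : String × Int) =>
        (PySem.List.pyGetD _ (PySem.Int.mod st.2 _) "" ++ st.1, PySem.Int.floordiv st.2 _))]
    rw [show (Int.ofNat j) = ((j : Nat) : Int) from rfl, pv_iter_char]
    simp
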